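-- pv_equiv track=rewrite | github.com/ep-eaglepoint-ai/bd_datasets_002 | utkjhd-pytest-tests-for-a-rate-limiter/evaluation/evaluation.py | map_criteria
-- ===== SOURCE A (Python) =====
-- def map_criteria(tests):
--     def check(name_fragments):
--         if isinstance(name_fragments, str):
--             name_fragments = [name_fragments]
--
--         matching_tests = [
--             t for t in tests
--             if any(frag.lower() in t["name"].lower() for frag in name_fragments)
--         ]
--
--         if not matching_tests:
--             return "Not Run"
--
--         has_failure = any(t["outcome"] == "failed" for t in matching_tests)
--         return "Fail" if has_failure else "Pass"
--
--     return {
--         # --- User Implementation Criteria (Req 1-10) ---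
--         "Req_1_First_Request": check("test_req_1"),
--         "Req_2_Increments": check("test_req_2"),
--         "Req_3_Limit_Exceeded": check("test_req_3"),
--         "Req_4_Window_Reset": check("test_req_4"),
--         "Req_5_Validate_Remaining": check(["test_req_1", "test_req_2", "test_req_3", "test_req_4"]),
--         "Req_6_Validate_Reset_Time": check(["test_req_1", "test_req_3"]),
--         "Req_7_Store_Interactions": check(["test_req_1", "test_req_2"]),
--         "Req_8_TTL_Values": check(["test_req_1", "test_req_8"]),
--         "Req_9_Invalid_Config": check("test_req_9"),
--         "Req_10_Missing_Keys": check("test_req_10"),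
--
--         # --- Meta Test Criteria (Mutation Testing) ---
--         # These now check if your suite correctly PASSED against valid code
--         # and correctly FAILED against the 4 broken implementations.
--         "Meta_Suite_Valid_Code":      check("test_passes_against_correct_code"),
--         "Meta_Catch_Infinite_Bug":    check("test_fails_against_infinite_allowance"),
--         "Meta_Catch_Window_Bug":      check("test_fails_against_broken_window_reset"),
--         "Meta_Catch_TTL_Bug":         check("test_fails_against_broken_ttl"),
--         "Meta_Catch_Validation_Bug":  check("test_fails_against_broken_validation")
--     }
-- ===== SOURCE B (Python) =====
-- _FRAGS = [
--     "test_req_1", "test_req_2", "test_req_3", "test_req_4",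
--     "test_req_8", "test_req_9", "test_req_10",
--     "test_passes_against_correct_code",
--     "test_fails_against_infinite_allowance",
--     "test_fails_against_broken_window_reset",
--     "test_fails_against_broken_ttl",
--     "test_fails_against_broken_validation",
-- ]
--
--
-- def map_criteria(tests):
--     # one pass over `tests`: per fragment keep (matched, failed) flags
--     status = {f: (False, False) for f in _FRAGS}
--     for t in tests:
--         name = t["name"].lower()
--         status = {
--             f: ((True, fl or t["outcome"] == "failed") if f in name else (m, fl))
--             for f, (m, fl) in status.items()
--         }
--
--     def res(frags):
--         if any(status[f][1] for f in frags):
--             return "Fail"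
--         if any(status[f][0] for f in frags):
--             return "Pass"
--         return "Not Run"
--
--     return {
--         "Req_1_First_Request": res(["test_req_1"]),
--         "Req_2_Increments": res(["test_req_2"]),
--         "Req_3_Limit_Exceeded": res(["test_req_3"]),
--         "Req_4_Window_Reset": res(["test_req_4"]),
--         "Req_5_Validate_Remaining": res(["test_req_1", "test_req_2", "test_req_3", "test_req_4"]),
--         "Req_6_Validate_Reset_Time": res(["test_req_1", "test_req_3"]),
--         "Req_7_Store_Interactions": res(["test_req_1", "test_req_2"]),
--         "Req_8_TTL_Values": res(["test_req_1", "test_req_8"]),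
--         "Req_9_Invalid_Config": res(["test_req_9"]),
--         "Req_10_Missing_Keys": res(["test_req_10"]),
--         "Meta_Suite_Valid_Code": res(["test_passes_against_correct_code"]),
--         "Meta_Catch_Infinite_Bug": res(["test_fails_against_infinite_allowance"]),
--         "Meta_Catch_Window_Bug": res(["test_fails_against_broken_window_reset"]),
--         "Meta_Catch_TTL_Bug": res(["test_fails_against_broken_ttl"]),
--         "Meta_Catch_Validation_Bug": res(["test_fails_against_broken_validation"]),
--     }
-- ===== Notes on version B (the rewrite author's own statement) =====
-- stated objective: alternative
-- what changed: A filters the whole test list once per criterion (15 scans via check); B makes a single pass over tests maintaining per-fragment matched/failed flags and then reads each criterion off those flags (Fail if any of its fragments saw a failure, else Pass if any matched, else Not Run).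
import Mathlib
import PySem

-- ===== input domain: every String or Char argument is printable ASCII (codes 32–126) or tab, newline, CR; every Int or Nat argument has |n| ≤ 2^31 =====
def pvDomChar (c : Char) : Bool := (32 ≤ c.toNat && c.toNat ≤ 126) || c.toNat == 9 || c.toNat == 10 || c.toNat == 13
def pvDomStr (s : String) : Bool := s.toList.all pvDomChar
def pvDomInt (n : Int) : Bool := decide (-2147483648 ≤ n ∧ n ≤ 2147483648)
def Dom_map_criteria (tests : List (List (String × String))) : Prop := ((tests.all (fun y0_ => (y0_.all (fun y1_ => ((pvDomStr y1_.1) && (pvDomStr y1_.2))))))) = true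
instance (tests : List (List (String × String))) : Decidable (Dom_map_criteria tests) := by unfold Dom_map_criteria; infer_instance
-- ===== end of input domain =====

-- B replaces A's fifteen scans over `tests` (one per criterion, via `check`) by a single pass
-- that records per-fragment matched/failed flags, then reads the criteria off those flags.


-- ===== PORT A =====
-- t["name"].lower() (Pre_ guarantees the key is present, so getD never takes its default)
def pvLowName (t : List (String × String)) : String :=
  PySem.Str.lower (PySem.Dict.getD (PySem.Dict.mk t) "name" "")

-- t["outcome"] == "failed" (Pre_ guarantees "outcome" is present on every matching test)
def pvFailed (t : List (String × String)) : Bool :=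
  PySem.Dict.getD (PySem.Dict.mk t) "outcome" "" == "failed"

-- A's inner `check` (the isinstance(str) branch is the caller wrapping the fragment in a list)
def pvCheck (tests : List (List (String × String))) (frags : List String) : String :=
  let matching := tests.filter (fun t =>
    frags.any (fun f => PySem.Str.isIn (PySem.Str.lower f) (pvLowName t)))
  if matching.isEmpty then "Not Run"
  else if matching.any (fun t => pvFailed t) then "Fail" else "Pass"

def map_criteria (tests : List (List (String × String))) : List (String × String) :=
  [("Req_1_First_Request", pvCheck tests ["test_req_1"]),
   ("Req_2_Increments", pvCheck tests ["test_req_2"]),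
   ("Req_3_Limit_Exceeded", pvCheck tests ["test_req_3"]),
   ("Req_4_Window_Reset", pvCheck tests ["test_req_4"]),
   ("Req_5_Validate_Remaining", pvCheck tests ["test_req_1", "test_req_2", "test_req_3", "test_req_4"]),
   ("Req_6_Validate_Reset_Time", pvCheck tests ["test_req_1", "test_req_3"]),
   ("Req_7_Store_Interactions", pvCheck tests ["test_req_1", "test_req_2"]),
   ("Req_8_TTL_Values", pvCheck tests ["test_req_1", "test_req_8"]),
   ("Req_9_Invalid_Config", pvCheck tests ["test_req_9"]),
   ("Req_10_Missing_Keys", pvCheck tests ["test_req_10"]),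
   ("Meta_Suite_Valid_Code", pvCheck tests ["test_passes_against_correct_code"]),
   ("Meta_Catch_Infinite_Bug", pvCheck tests ["test_fails_against_infinite_allowance"]),
   ("Meta_Catch_Window_Bug", pvCheck tests ["test_fails_against_broken_window_reset"]),
   ("Meta_Catch_TTL_Bug", pvCheck tests ["test_fails_against_broken_ttl"]),
   ("Meta_Catch_Validation_Bug", pvCheck tests ["test_fails_against_broken_validation"])]

-- ===== PORT B =====
def pvFrags : List String :=
  ["test_req_1", "test_req_2", "test_req_3", "test_req_4",
   "test_req_8", "test_req_9", "test_req_10",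
   "test_passes_against_correct_code",
   "test_fails_against_infinite_allowance",
   "test_fails_against_broken_window_reset",
   "test_fails_against_broken_ttl",
   "test_fails_against_broken_validation"]

-- one test's update of the status dict (the dict comprehension over status.items())
def pvUpd (t : List (String × String)) (st : List (String × Bool × Bool)) :
    List (String × Bool × Bool) :=
  let name := pvLowName t
  st.map (fun e => if PySem.Str.isIn e.1 name then (e.1, true, e.2.2 || pvFailed t) else e)

-- B's `res`
def pvRes (st : List (String × Bool × Bool)) (frags : List String) : String :=
  if frags.any (fun f => (PySem.Dict.getD (PySem.Dict.mk st) f (false, false)).2) then "Fail"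
  else if frags.any (fun f => (PySem.Dict.getD (PySem.Dict.mk st) f (false, false)).1) then "Pass"
  else "Not Run"

def map_criteria_alt (tests : List (List (String × String))) : List (String × String) :=
  let st := tests.foldl (fun s t => pvUpd t s) (pvFrags.map (fun f => (f, false, false)))
  [("Req_1_First_Request", pvRes st ["test_req_1"]),
   ("Req_2_Increments", pvRes st ["test_req_2"]),
   ("Req_3_Limit_Exceeded", pvRes st ["test_req_3"]),
   ("Req_4_Window_Reset", pvRes st ["test_req_4"]),
   ("Req_5_Validate_Remaining", pvRes st ["test_req_1", "test_req_2", "test_req_3", "test_req_4"]),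
   ("Req_6_Validate_Reset_Time", pvRes st ["test_req_1", "test_req_3"]),
   ("Req_7_Store_Interactions", pvRes st ["test_req_1", "test_req_2"]),
   ("Req_8_TTL_Values", pvRes st ["test_req_1", "test_req_8"]),
   ("Req_9_Invalid_Config", pvRes st ["test_req_9"]),
   ("Req_10_Missing_Keys", pvRes st ["test_req_10"]),
   ("Meta_Suite_Valid_Code", pvRes st ["test_passes_against_correct_code"]),
   ("Meta_Catch_Infinite_Bug", pvRes st ["test_fails_against_infinite_allowance"]),
   ("Meta_Catch_Window_Bug", pvRes st ["test_fails_against_broken_window_reset"]),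
   ("Meta_Catch_TTL_Bug", pvRes st ["test_fails_against_broken_ttl"]),
   ("Meta_Catch_Validation_Bug", pvRes st ["test_fails_against_broken_validation"])]

-- ===== PRECONDITION & SPEC =====
-- Pre_ excludes exactly the inputs on which A raises KeyError: a test dict without a "name"
-- key, or one whose lowered name contains some criterion fragment but has no "outcome" key.
def Pre_map_criteria (tests : List (List (String × String))) : Prop :=
  (tests.all (fun t =>
    PySem.Dict.contains (PySem.Dict.mk t) "name" &&
    (!(["test_req_1", "test_req_2", "test_req_3", "test_req_4",
        "test_req_8", "test_req_9", "test_req_10",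
        "test_passes_against_correct_code",
        "test_fails_against_infinite_allowance",
        "test_fails_against_broken_window_reset",
        "test_fails_against_broken_ttl",
        "test_fails_against_broken_validation"].any (fun f =>
          PySem.Str.isIn f (PySem.Str.lower (PySem.Dict.getD (PySem.Dict.mk t) "name" ""))))
     || PySem.Dict.contains (PySem.Dict.mk t) "outcome"))) = true

instance (tests : List (List (String × String))) : Decidable (Pre_map_criteria tests) := by
  unfold Pre_map_criteria; infer_instance

def pvWitness_map_criteria : (List (List (String × String))) :=
  [[("name", "test_req_1_ok"), ("outcome", "passed")],
   [("name", "test_req_3_limit"), ("outcome", "failed")],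
   [("name", "unrelated")]]

def Spec_map_criteria (tests : List (List (String × String))) (out : List (String × String)) : Prop := out = map_criteria_alt tests
instance (tests : List (List (String × String))) (out : List (String × String)) : Decidable (Spec_map_criteria tests out) := by unfold Spec_map_criteria; infer_instance

-- ===== CLAIM (what is proved, stated in full; the proofs are below) =====
def Claim_equal_map_criteria : Prop := ∀ (tests : List (List (String × String))), Dom_map_criteria tests → Pre_map_criteria tests → Spec_map_criteria tests (map_criteria tests)

-- ===== LEMMAS AND PROOFS =====
-- "some test's lowered name contains fragment f"
def pvM (tests : List (List (String × String))) (f : String) : Bool :=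
  tests.any (fun t => PySem.Str.isIn f (pvLowName t))

-- "some test's lowered name contains fragment f and its outcome is failed"
def pvF (tests : List (List (String × String))) (f : String) : Bool :=
  tests.any (fun t => PySem.Str.isIn f (pvLowName t) && pvFailed t)

lemma pvFold_eq (tests : List (List (String × String)))
    (st : List (String × Bool × Bool)) :
    tests.foldl (fun s t => pvUpd t s) st =
      st.map (fun e => (e.1, e.2.1 || pvM tests e.1, e.2.2 || pvF tests e.1)) := by
  induction tests generalizing st with
  | nil => simp [pvM, pvF]
  | cons t ts ih =>
      rw [List.foldl_cons, ih]
      simp only [pvUpd, List.map_map]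
      refine List.map_congr_left (fun e _ => ?_)
      by_cases h : PySem.Chars.isIn e.1.toList (pvLowName t).toList
      · simp [pvM, pvF, h, Bool.or_assoc]
      · simp [pvM, pvF, h]

lemma pvGetD_map_key (l : List String) (g h : String → Bool) (f : String) (d : Bool × Bool)
    (hf : f ∈ l) :
    PySem.Dict.getD (PySem.Dict.mk (l.map (fun x => (x, g x, h x)))) f d = (g f, h f) := by
  induction l with
  | nil => cases hf
  | cons a l ih =>
      by_cases ha : a = f
      · subst ha
        simp [PySem.Dict.getD_eq_get?_getD, PySem.Dict.get?_mk_cons]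
      · rcases List.mem_cons.mp hf with hfa | hfl
        · exact absurd hfa.symm ha
        · simpa [PySem.Dict.getD_eq_get?_getD, PySem.Dict.get?_mk_cons, ha]
            using ih hfl

-- both sides of one criterion, reduced to the pvM / pvF predicates
lemma pvCheck_eq (tests : List (List (String × String))) (frags : List String)
    (hl : ∀ f ∈ frags, PySem.Str.lower f = f) :
    pvCheck tests frags =
      if frags.any (pvF tests) then "Fail"
      else if frags.any (pvM tests) then "Pass" else "Not Run" := by
  have hpred : tests.filter (fun t => frags.any (fun f =>
        PySem.Str.isIn (PySem.Str.lower f) (pvLowName t)))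
      = tests.filter (fun t => frags.any (fun f => PySem.Str.isIn f (pvLowName t))) :=
    List.filter_congr (fun t _ => by
      rw [Bool.eq_iff_iff]; simp only [List.any_eq_true]
      exact exists_congr fun f => and_congr_right fun hf => by rw [hl f hf])
  have hE : (tests.filter (fun t => frags.any (fun f =>
        PySem.Str.isIn f (pvLowName t)))).isEmpty = !(frags.any (pvM tests)) := by
    rw [Bool.eq_iff_iff, List.isEmpty_iff, List.filter_eq_nil_iff, Bool.not_eq_true',
        List.any_eq_false]
    simp only [pvM, List.any_eq_true, not_exists, not_and]
    constructor
    · intro hh f hf t ht hin; exact hh t ht f hf hin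
    · intro hh t ht f hf hin; exact hh f hf t ht hin
  have hA : (tests.filter (fun t => frags.any (fun f =>
        PySem.Str.isIn f (pvLowName t)))).any (fun t => pvFailed t)
      = frags.any (pvF tests) := by
    rw [List.any_filter, Bool.eq_iff_iff]
    simp only [List.any_eq_true, Bool.and_eq_true, pvF]
    constructor
    · rintro ⟨t, ht, ⟨f, hf, hin⟩, hfail⟩; exact ⟨f, hf, t, ht, hin, hfail⟩
    · rintro ⟨f, hf, t, ht, hin, hfail⟩; exact ⟨t, ht, ⟨f, hf, hin⟩, hfail⟩
  have hFM : frags.any (pvF tests) = true → frags.any (pvM tests) = true := by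
    simp only [List.any_eq_true, pvF, pvM, Bool.and_eq_true]
    rintro ⟨f, hf, t, ht, hin, _⟩; exact ⟨f, hf, t, ht, hin⟩
  simp only [pvCheck]
  rw [hpred, hE, hA]
  by_cases h1 : frags.any (pvF tests)
  · simp [h1, hFM h1]
  · by_cases h2 : frags.any (pvM tests) <;> simp [h1, h2]

lemma pvRes_eq (tests : List (List (String × String))) (frags : List String)
    (hs : ∀ f ∈ frags, f ∈ pvFrags) :
    pvRes (tests.foldl (fun s t => pvUpd t s) (pvFrags.map (fun f => (f, false, false)))) frags =
      if frags.any (pvF tests) then "Fail"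
      else if frags.any (pvM tests) then "Pass" else "Not Run" := by
  rw [pvFold_eq]
  have hst : (pvFrags.map (fun f => (f, false, false))).map
      (fun e => (e.1, e.2.1 || pvM tests e.1, e.2.2 || pvF tests e.1))
      = pvFrags.map (fun f => (f, pvM tests f, pvF tests f)) := by
    simp [List.map_map]
  rw [hst]
  have h2 : ∀ f ∈ frags,
      PySem.Dict.getD (PySem.Dict.mk (pvFrags.map (fun f => (f, pvM tests f, pvF tests f)))) f
        (false, false) = (pvM tests f, pvF tests f) :=
    fun f hf => pvGetD_map_key pvFrags (pvM tests) (pvF tests) f (false, false) (hs f hf)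
  have e2 : ∀ (pr : Bool × Bool → Bool) (w : String → Bool),
      (∀ f ∈ frags, pr ((pvM tests f, pvF tests f)) = w f) →
      (frags.any (fun f =>
        pr (PySem.Dict.getD (PySem.Dict.mk (pvFrags.map (fun f => (f, pvM tests f, pvF tests f))))
          f (false, false)))) = frags.any w := by
    intro pr w hw
    rw [Bool.eq_iff_iff]; simp only [List.any_eq_true]
    exact exists_congr fun f => and_congr_right fun hf => by rw [h2 f hf, hw f hf]
  simp only [pvRes]
  rw [e2 (fun p => p.2) (pvF tests) (fun f _ => rfl), e2 (fun p => p.1) (pvM tests) (fun f _ => rfl)]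

lemma pvBoth (tests : List (List (String × String))) (frags : List String)
    (hs : ∀ f ∈ frags, f ∈ pvFrags) :
    pvCheck tests frags =
      pvRes (tests.foldl (fun s t => pvUpd t s) (pvFrags.map (fun f => (f, false, false)))) frags := by
  have hlow : ∀ f ∈ pvFrags, PySem.Str.lower f = f := by decide
  rw [pvRes_eq tests frags hs, pvCheck_eq tests frags (fun f hf => hlow f (hs f hf))]

-- ===== VERDICT (by name: the statement is the Claim_ definition above) =====
theorem map_criteria_spec : Claim_equal_map_criteria := by
  intro tests _ _
  unfold Spec_map_criteria map_criteria map_criteria_alt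
  rw [pvBoth tests _ (by decide), pvBoth tests _ (by decide), pvBoth tests _ (by decide),
      pvBoth tests _ (by decide), pvBoth tests _ (by decide), pvBoth tests _ (by decide),
      pvBoth tests _ (by decide), pvBoth tests _ (by decide), pvBoth tests _ (by decide),
      pvBoth tests _ (by decide), pvBoth tests _ (by decide), pvBoth tests _ (by decide),
      pvBoth tests _ (by decide), pvBoth tests _ (by decide), pvBoth tests _ (by decide)]
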